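-- pv_equiv track=rewrite | github.com/nschmider/learna | src/learna/utils/encodings.py | encode_pairing
-- ===== SOURCE A (Python) =====
-- def encode_pairing(target):
--     """
--     Encodes the pairings of the dot-bracket notation.
--     Ignore pairs that are separated by an N.
--
--     Args:
--         target (string): The target design.
--
--     Returns:
--         list: The paired sites.
--     """
--     pairing_encoding = [None] * len(target)
--     stack = []
--     pseudo_knots = []
--     for index, symbol in enumerate(target, 0):
--         if symbol == "(":
--             stack.append(index)
--         elif symbol == "[":
--             pseudo_knots.append(index)
--         elif symbol == ")" and stack:
--             paired_site = stack.pop()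
--             pairing_encoding[paired_site] = index
--             pairing_encoding[index] = paired_site
--         elif symbol == "]" and pseudo_knots:
--             paired_site = pseudo_knots.pop()
--             pairing_encoding[paired_site] = index
--             pairing_encoding[index] = paired_site
--         elif symbol == "N":
--             stack = []
--             pseudo_knots = []
--     return pairing_encoding
-- ===== SOURCE B (Python) =====
-- def encode_pairing(target):
--     """Split-on-'N' re-implementation: match brackets per segment, collect
--     pairs in a dict, emit the result as a comprehension over all positions."""
--     pairs = {}
--     start = 0
--     for seg in target.split("N"):
--         round_open = []
--         square_open = []
--         for off, ch in enumerate(seg):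
--             i = start + off
--             if ch == "(":
--                 round_open.append(i)
--             elif ch == "[":
--                 square_open.append(i)
--             elif ch == ")" and round_open:
--                 j = round_open.pop()
--                 pairs[j] = i
--                 pairs[i] = j
--             elif ch == "]" and square_open:
--                 j = square_open.pop()
--                 pairs[j] = i
--                 pairs[i] = j
--         start += len(seg) + 1
--     return [pairs.get(i) for i in range(len(target))]
-- ===== Notes on version B (the rewrite author's own statement) =====
-- stated objective: alternative
-- what changed: B splits the target on 'N' (a hard reset boundary), matches brackets per segment collecting pairs in a dict keyed by position, and produces the output in one final lookup pass over all indices, instead of A's single flat pass mutating a preallocated list with resettable stacks.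
import Mathlib
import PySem

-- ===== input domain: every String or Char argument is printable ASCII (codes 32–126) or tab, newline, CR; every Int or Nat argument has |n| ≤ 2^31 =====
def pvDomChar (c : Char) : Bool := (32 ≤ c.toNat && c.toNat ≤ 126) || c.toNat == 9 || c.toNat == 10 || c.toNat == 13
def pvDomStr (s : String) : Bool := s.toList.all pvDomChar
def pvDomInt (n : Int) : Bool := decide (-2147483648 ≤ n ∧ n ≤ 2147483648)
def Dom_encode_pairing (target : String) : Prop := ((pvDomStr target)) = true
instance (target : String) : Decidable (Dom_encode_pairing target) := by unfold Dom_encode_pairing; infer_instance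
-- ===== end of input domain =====

-- B re-implements A by splitting on 'N' (a hard reset boundary), matching brackets per
-- segment into a dict of pairs, and emitting the answer as one lookup pass (objective:
-- alternative decomposition, same asymptotic cost).

-- ===== PORT A =====
-- enumerate(target, 0): index/char pairs starting at k
def enumFrom (k : Nat) : List Char → List (Nat × Char)
  | [] => []
  | c :: cs => (k, c) :: enumFrom (k + 1) cs

-- one iteration of A's loop; stacks are Lean lists with the top at the head
-- (same abstract stack as Python's append/pop at the end)
def stepA (st : List (Option Int) × List Nat × List Nat) (p : Nat × Char) :
    List (Option Int) × List Nat × List Nat :=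
  match st, p with
  | (enc, s1, s2), (idx, c) =>
    if c = '(' then (enc, idx :: s1, s2)
    else if c = '[' then (enc, s1, idx :: s2)
    else if c = ')' then
      match s1 with
      | [] => (enc, s1, s2)          -- "elif symbol == ')' and stack" is false: fall through, no-op
      | ph :: t => ((enc.set ph (some (idx : Int))).set idx (some (ph : Int)), t, s2)
    else if c = ']' then
      match s2 with
      | [] => (enc, s1, s2)
      | ph :: t => ((enc.set ph (some (idx : Int))).set idx (some (ph : Int)), s1, t)
    else if c = 'N' then (enc, [], [])
    else (enc, s1, s2)

def encode_pairing (target : String) : List (Option Int) :=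
  (List.foldl stepA (List.replicate target.toList.length none, [], [])
    (enumFrom 0 target.toList)).1

-- ===== PORT B =====
-- target.split("N") on the character list (exact for a 1-char separator)
def splitSegs (cs : List Char) : List (List Char) :=
  let seg := cs.takeWhile (· ≠ 'N')
  match h : cs.dropWhile (· ≠ 'N') with
  | [] => [seg]
  | _ :: rest => seg :: splitSegs rest
termination_by cs.length
decreasing_by
  have hle := List.length_dropWhile_le (fun c => decide (c ≠ 'N')) cs
  simp only [h, List.length_cons] at hle
  omega

-- one iteration of B's inner (per-segment) loop
def stepB (start : Nat) (st : PySem.Dict Nat Int × List Nat × List Nat) (p : Nat × Char) :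
    PySem.Dict Nat Int × List Nat × List Nat :=
  match st, p with
  | (pairs, s1, s2), (off, c) =>
    let i := start + off
    if c = '(' then (pairs, i :: s1, s2)
    else if c = '[' then (pairs, s1, i :: s2)
    else if c = ')' then
      match s1 with
      | [] => (pairs, s1, s2)
      | j :: t => ((pairs.insert j (i : Int)).insert i (j : Int), t, s2)
    else if c = ']' then
      match s2 with
      | [] => (pairs, s1, s2)
      | j :: t => ((pairs.insert j (i : Int)).insert i (j : Int), s1, t)
    else (pairs, s1, s2)

def runSeg (pairs : PySem.Dict Nat Int) (start : Nat) (seg : List Char) : PySem.Dict Nat Int :=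
  (List.foldl (stepB start) (pairs, [], []) (enumFrom 0 seg)).1

def encode_pairing_alt (target : String) : List (Option Int) :=
  (List.range target.toList.length).map (fun i =>
    ((splitSegs target.toList).foldl
      (fun (st : PySem.Dict Nat Int × Nat) seg => (runSeg st.1 st.2 seg, st.2 + seg.length + 1))
      (PySem.Dict.empty, 0)).1.get? i)

-- ===== PRECONDITION & SPEC =====
def Spec_encode_pairing (target : String) (out : List (Option Int)) : Prop := out = encode_pairing_alt target
instance (target : String) (out : List (Option Int)) : Decidable (Spec_encode_pairing target out) := by unfold Spec_encode_pairing; infer_instance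

-- ===== CLAIM (what is proved, stated in full; the proofs are below) =====
def Claim_equal_encode_pairing : Prop := ∀ (target : String), Dom_encode_pairing target → Spec_encode_pairing target (encode_pairing target)

-- ===== LEMMAS AND PROOFS =====

-- the simulation relation between A's array and B's dict
def mapGet (N : Nat) (d : PySem.Dict Nat Int) : List (Option Int) :=
  (List.range N).map (fun i => d.get? i)

lemma set_mapGet (N i : Nat) (v : Int) (d : PySem.Dict Nat Int) :
    (mapGet N d).set i (some v) = mapGet N (d.insert i v) := by
  apply List.ext_getElem
  · simp [mapGet]
  · intro m h1 h2
    simp only [mapGet, List.length_set, List.length_map, List.length_range] at h1 h2 ⊢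
    rw [List.getElem_set]
    simp only [List.getElem_map, List.getElem_range, PySem.Dict.get?_insert]
    by_cases h : i = m
    · simp [h]
    · simp [h, Ne.symm h]

lemma enumFrom_append (k : Nat) (xs ys : List Char) :
    enumFrom k (xs ++ ys) = enumFrom k xs ++ enumFrom (k + xs.length) ys := by
  induction xs generalizing k with
  | nil => simp [enumFrom]
  | cons c xs ih => simp [enumFrom, ih, Nat.add_assoc, Nat.add_comm 1 xs.length]

lemma dropWhile_head_false {p : Char → Bool} :
    ∀ (l : List Char) (c : Char) (rest : List Char), l.dropWhile p = c :: rest → p c = false := by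
  intro l
  induction l with
  | nil => intro c rest h; cases h
  | cons a t ih =>
    intro c rest h
    by_cases hp : p a
    · simp [hp] at h
      exact ih _ _ h
    · simp [hp] at h
      rw [← h.1]
      simpa using hp

lemma stepA_N (enc : List (Option Int)) (s1 s2 : List Nat) (i : Nat) :
    stepA (enc, s1, s2) (i, 'N') = (enc, [], []) := by
  simp [stepA]

-- running A over one 'N'-free segment simulates B's per-segment loop
lemma segRun (N : Nat) (seg : List Char) : ∀ (start off : Nat) (s1 s2 : List Nat)
    (d : PySem.Dict Nat Int), 'N' ∉ seg →
    List.foldl stepA (mapGet N d, s1, s2) (enumFrom (start + off) seg)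
      = ((mapGet N (List.foldl (stepB start) (d, s1, s2) (enumFrom off seg)).1,
          (List.foldl (stepB start) (d, s1, s2) (enumFrom off seg)).2.1,
          (List.foldl (stepB start) (d, s1, s2) (enumFrom off seg)).2.2)) := by
  induction seg with
  | nil => intro start off s1 s2 d _; simp [enumFrom]
  | cons c rest ih =>
    intro start off s1 s2 d hN
    simp only [List.mem_cons, not_or] at hN
    obtain ⟨hc, hrest⟩ := hN
    simp only [enumFrom, List.foldl_cons]
    have harith : start + off + 1 = start + (off + 1) := by omega
    by_cases h1 : c = '('
    · subst h1
      simp only [stepA, stepB]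
      norm_num
      rw [harith]
      exact ih start (off + 1) _ _ _ hrest
    · by_cases h2 : c = '['
      · subst h2
        simp only [stepA, stepB]
        norm_num
        rw [harith]
        exact ih start (off + 1) _ _ _ hrest
      · by_cases h3 : c = ')'
        · subst h3
          cases s1 with
          | nil =>
            simp only [stepA, stepB]
            norm_num
            rw [harith]
            exact ih start (off + 1) _ _ _ hrest
          | cons j t =>
            simp only [stepA, stepB]
            norm_num
            rw [set_mapGet, set_mapGet, harith]
            exact ih start (off + 1) _ _ _ hrest
        · by_cases h4 : c = ']'
          · subst h4
            cases s2 with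
            | nil =>
              simp only [stepA, stepB]
              norm_num
              rw [harith]
              exact ih start (off + 1) _ _ _ hrest
            | cons j t =>
              simp only [stepA, stepB]
              norm_num
              rw [set_mapGet, set_mapGet, harith]
              exact ih start (off + 1) _ _ _ hrest
          · have h5 : c ≠ 'N' := fun h => hc h.symm
            simp only [stepA, stepB, if_neg h1, if_neg h2, if_neg h3, if_neg h4, if_neg h5]
            rw [harith]
            exact ih start (off + 1) _ _ _ hrest

lemma main_sim (N : Nat) : ∀ (n : Nat) (cs : List Char), cs.length = n →
    ∀ (start : Nat) (d : PySem.Dict Nat Int),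
    (List.foldl stepA (mapGet N d, ([] : List Nat), ([] : List Nat)) (enumFrom start cs)).1
      = mapGet N ((splitSegs cs).foldl
          (fun (st : PySem.Dict Nat Int × Nat) seg => (runSeg st.1 st.2 seg, st.2 + seg.length + 1))
          (d, start)).1 := by
  intro n
  induction n using Nat.strong_induction_on with
  | _ n ih =>
    intro cs hlen start d
    have hsplit := List.takeWhile_append_dropWhile (p := fun c => decide (c ≠ 'N')) (l := cs)
    have hN : 'N' ∉ cs.takeWhile (fun c => decide (c ≠ 'N')) := by
      intro hmem
      have := List.mem_takeWhile_imp hmem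
      simp at this
    have hseg := segRun N (cs.takeWhile (fun c => decide (c ≠ 'N'))) start 0 [] [] d hN
    simp only [Nat.add_zero] at hseg
    cases hdp : cs.dropWhile (fun c => decide (c ≠ 'N')) with
    | nil =>
      have hcs : cs = cs.takeWhile (fun c => decide (c ≠ 'N')) := by
        conv_lhs => rw [← hsplit]
        rw [hdp, List.append_nil]
      rw [splitSegs]
      rw [hdp]
      conv_lhs => rw [hcs]
      rw [hseg]
      rfl
    | cons c rest =>
      have hcN : c = 'N' := by
        have := dropWhile_head_false (p := fun c => decide (c ≠ 'N')) cs c rest hdp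
        simpa using this
      subst hcN
      have hcs : cs = cs.takeWhile (fun c => decide (c ≠ 'N')) ++ 'N' :: rest := by
        conv_lhs => rw [← hsplit]
        rw [hdp]
      rw [splitSegs]
      rw [hdp]
      conv_lhs => rw [hcs]
      rw [enumFrom_append]
      simp only [enumFrom, List.foldl_append, List.foldl_cons]
      rw [hseg]
      rw [stepA_N]
      have hlt : rest.length < n := by
        have := congrArg List.length hcs
        simp at this
        omega
      have := ih rest.length hlt rest rfl
        (start + (cs.takeWhile (fun c => decide (c ≠ 'N'))).length + 1)
        (runSeg d start (cs.takeWhile (fun c => decide (c ≠ 'N'))))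
      have hrs : runSeg d start (cs.takeWhile (fun c => decide (c ≠ 'N')))
          = (List.foldl (stepB start) (d, [], [])
              (enumFrom 0 (cs.takeWhile (fun c => decide (c ≠ 'N'))))).1 := rfl
      rw [← hrs]
      exact this

-- ===== VERDICT (by name: the statement is the Claim_ definition above) =====
theorem encode_pairing_spec : Claim_equal_encode_pairing := by
  intro target _
  show encode_pairing target = encode_pairing_alt target
  unfold encode_pairing encode_pairing_alt
  have h0 : List.replicate target.toList.length (none : Option Int)
      = mapGet target.toList.length PySem.Dict.empty := by
    simp [mapGet, PySem.Dict.get?_empty, List.map_const']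
  rw [h0, main_sim target.toList.length target.toList.length target.toList rfl 0 PySem.Dict.empty]
  rfl
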